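-- pv_equiv track=rewrite | github.com/Alex-Yola/Python_lessons | dynamic_programming.py | track_counter
-- ===== SOURCE A (Python) =====
-- def track_counter(x, y):
--     """Возвращает матрицу с числом путей к клеткам с координатами (0..x, 0..y).
--     Шаги: (0,1) или (1,0).
--     """
--     K = [[0] * (x + 1) for n in range(y + 1)]
--     for i in range(y + 1):
--         K[i][0] = 1
--     for j in range(x + 1):
--         K[0][j] = 1
--     for i in range(1, y + 1):
--         for j in range(1, x + 1):
--             K[i][j] = K[i - 1][j] + K[i][j - 1]
--     return K
-- ===== SOURCE B (Python) =====
-- def track_counter(x, y):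
--     """Each cell (i, j) holds C(i+j, j), the number of monotone lattice paths;
--     rows are computed independently with the multiplicative binomial recurrence
--     instead of filling a DP table from seeded boundaries."""
--     res = []
--     for i in range(y + 1):
--         row = []
--         c = 1
--         for j in range(x + 1):
--             row.append(c)
--             c = c * (i + j + 1) // (j + 1)
--         res.append(row)
--     return res
-- ===== Notes on version B (the rewrite author's own statement) =====
-- stated objective: alternative
-- what changed: Replaces the boundary-seeded additive DP table fill with an independent per-row closed-form computation: each cell is the binomial coefficient C(i+j, j), produced by the multiplicative recurrence c := c*(i+j+1)//(j+1), so no row depends on the previous row.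
import Mathlib
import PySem

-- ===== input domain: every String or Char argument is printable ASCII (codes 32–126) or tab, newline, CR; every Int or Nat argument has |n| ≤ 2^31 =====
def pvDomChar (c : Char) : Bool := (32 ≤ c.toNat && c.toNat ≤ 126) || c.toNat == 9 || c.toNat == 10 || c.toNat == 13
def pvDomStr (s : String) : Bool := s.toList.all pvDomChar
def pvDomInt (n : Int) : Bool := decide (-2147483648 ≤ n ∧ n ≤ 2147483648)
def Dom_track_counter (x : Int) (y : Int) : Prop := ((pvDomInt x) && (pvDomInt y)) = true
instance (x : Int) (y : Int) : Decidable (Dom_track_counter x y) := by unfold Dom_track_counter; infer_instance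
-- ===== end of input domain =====

-- B replaces the boundary-seeded additive DP fill with an independent per-row
-- closed-form pass (each cell is C(i+j, j), built by the multiplicative
-- recurrence c := c*(i+j+1)//(j+1)); same asymptotic cost, different algorithm.
-- A raises IndexError when exactly one of x, y is negative; Pre_ excludes exactly those inputs.

-- ===== PORT A =====
-- K[i][j] = v  (in-range in A's loops; getD/set are exact there)
def pvSetMat (K : List (List Int)) (i j : Nat) (v : Int) : List (List Int) :=
  K.set i ((K.getD i []).set j v)

-- K[i][j]  (in-range in A's loops)
def pvGetMat (K : List (List Int)) (i j : Nat) : Int :=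
  (K.getD i []).getD j 0

def track_counter (x : Int) (y : Int) : List (List Int) :=
  let K0 := (PySem.List.pyRange 0 (y+1) 1).map (fun _ => List.replicate (x+1).toNat (0:Int))
  let K1 := (PySem.List.pyRange 0 (y+1) 1).foldl (fun K i => pvSetMat K i.toNat 0 1) K0
  let K2 := (PySem.List.pyRange 0 (x+1) 1).foldl (fun K j => pvSetMat K 0 j.toNat 1) K1
  (PySem.List.pyRange 1 (y+1) 1).foldl (fun K i =>
    (PySem.List.pyRange 1 (x+1) 1).foldl (fun K j =>
      pvSetMat K i.toNat j.toNat
        (pvGetMat K (i.toNat - 1) j.toNat + pvGetMat K i.toNat (j.toNat - 1))) K) K2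

-- ===== PORT B =====
def track_counter_alt (x : Int) (y : Int) : List (List Int) :=
  (PySem.List.pyRange 0 (y+1) 1).foldl (fun res i =>
    res ++ [((PySem.List.pyRange 0 (x+1) 1).foldl
        (fun (s : List Int × Int) j =>
          (s.1 ++ [s.2], PySem.Int.floordiv (s.2 * (i + j + 1)) (j + 1)))
        ([], 1)).1]) []

-- ===== PRECONDITION & SPEC =====
-- Pre_ excludes exactly the inputs where A raises IndexError: one coordinate
-- negative and the other nonnegative (row-0 / column-0 seeding indexes an empty list).
def Pre_track_counter (x : Int) (y : Int) : Prop :=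
  (0 ≤ x ∧ 0 ≤ y) ∨ (x < 0 ∧ y < 0)
instance (x : Int) (y : Int) : Decidable (Pre_track_counter x y) := by
  unfold Pre_track_counter; infer_instance
def pvWitness_track_counter : Int × Int := (2, 2)

def Spec_track_counter (x : Int) (y : Int) (out : List (List Int)) : Prop := out = track_counter_alt x y
instance (x : Int) (y : Int) (out : List (List Int)) : Decidable (Spec_track_counter x y out) := by unfold Spec_track_counter; infer_instance

-- ===== CLAIM (what is proved, stated in full; the proofs are below) =====
def Claim_equal_track_counter : Prop := ∀ (x : Int) (y : Int), Dom_track_counter x y → Pre_track_counter x y → Spec_track_counter x y (track_counter x y)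

-- ===== LEMMAS AND PROOFS =====

-- helper values: cVal i j = C(i+j, j), cRow i m = row i of the path-count matrix
def cVal (i j : Nat) : Int := (Nat.choose (i+j) j : Int)
def cRow (i m : Nat) : List Int := (List.range m).map (cVal i)

-- getD after set
lemma getD_set_self {a : Type} (d : a) (l : List a) (i : Nat) (v : a) (h : i < l.length) :
    (l.set i v).getD i d = v := by
  simp [List.getD_eq_getElem?_getD, h]

lemma getD_set_ne {a : Type} (d : a) (l : List a) (i k : Nat) (v : a) (h : k ≠ i) :
    (l.set i v).getD k d = l.getD k d := by
  simp [List.getD_eq_getElem?_getD, Ne.symm h]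

-- a loop that sets each index once, independently: it is List.map
lemma foldl_set_indep {a : Type} (d : a) (g : a → a) :
    ∀ (K P : List a),
      (List.range' P.length K.length 1).foldl (fun M i => M.set i (g (M.getD i d))) (P ++ K)
        = P ++ K.map g := by
  intro K
  induction K with
  | nil => intro P; simp
  | cons c K ih =>
      intro P
      rw [List.length_cons, List.range'_succ, List.foldl_cons]
      have h1 : (P ++ c :: K).getD P.length d = c := by
        simp [List.getD_eq_getElem?_getD]
      have h2 : (P ++ c :: K).set P.length (g c) = (P ++ [g c]) ++ K := by
        rw [List.set_append]
        simp
      rw [h1, h2]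
      have h3 := ih (P ++ [g c])
      simp only [List.length_append, List.length_singleton] at h3
      rw [h3]
      simp

-- scan of a "row i from row i-1" loop
def pvScan {a : Type} (g : Nat → a → a → a) : Nat → a → List a → List a
  | _, _, [] => []
  | s, p, c :: l => g s p c :: pvScan g (s+1) (g s p c) l

lemma foldl_set_scan {a : Type} (d : a) (g : Nat → a → a → a) :
    ∀ (K P : List a), P ≠ [] →
      (List.range' P.length K.length 1).foldl
          (fun M i => M.set i (g i (M.getD (i-1) d) (M.getD i d))) (P ++ K)
        = P ++ pvScan g P.length (P.getD (P.length - 1) d) K := by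
  intro K
  induction K with
  | nil => intro P _; simp [pvScan]
  | cons c K ih =>
      intro P hP
      rw [List.length_cons, List.range'_succ, List.foldl_cons]
      have hlen : 0 < P.length := List.length_pos_iff.mpr hP
      have h0 : (P ++ c :: K).getD (P.length - 1) d = P.getD (P.length - 1) d := by
        simp [List.getD_eq_getElem?_getD, List.getElem?_append_left (by omega : P.length - 1 < P.length)]
      have h1 : (P ++ c :: K).getD P.length d = c := by
        simp [List.getD_eq_getElem?_getD]
      set c' := g P.length (P.getD (P.length - 1) d) c with hc'
      have h2 : (P ++ c :: K).set P.length c' = (P ++ [c']) ++ K := by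
        rw [List.set_append]
        simp
      rw [h0, h1, h2]
      have h3 := ih (P ++ [c']) (by simp)
      simp only [List.length_append, List.length_singleton, Nat.add_sub_cancel] at h3
      have h4 : (P ++ [c']).getD P.length d = c' := by
        simp [List.getD_eq_getElem?_getD]
      rw [h4] at h3
      rw [h3]
      simp only [pvScan, List.append_assoc, List.singleton_append]
      rw [← hc']

-- a loop that repeatedly rewrites element 0
lemma foldl_set_head {b a : Type} (d : a) (u : b → a → a) :
    ∀ (js : List b) (c : a) (t : List a),
      js.foldl (fun M j => M.set 0 (u j (M.getD 0 d))) (c :: t)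
        = (js.foldl (fun r j => u j r) c) :: t := by
  intro js
  induction js with
  | nil => intro c t; rfl
  | cons j js ih =>
      intro c t
      simp only [List.foldl_cons, List.set_cons_zero, List.getD_cons_zero]
      exact ih (u j c) t

-- the inner loop of A touches only row i, reading the (fixed) row i-1
lemma foldl_inner_row (js : List Int) :
    ∀ (i : Nat) (M : List (List Int)), 1 ≤ i → i < M.length →
      js.foldl (fun M j =>
          pvSetMat M i j.toNat (pvGetMat M (i - 1) j.toNat + pvGetMat M i (j.toNat - 1))) M
        = M.set i (js.foldl
            (fun r j => r.set j.toNat ((M.getD (i-1) []).getD j.toNat 0 + r.getD (j.toNat - 1) 0))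
            (M.getD i [])) := by
  induction js with
  | nil =>
      intro i M hi hlt
      simp only [List.foldl_nil]
      rw [List.getD_eq_getElem?_getD, List.getElem?_eq_getElem hlt]
      simp
  | cons j js ih =>
      intro i M hi hlt
      simp only [List.foldl_cons]
      rw [ih i _ hi (by simpa [pvSetMat] using hlt)]
      unfold pvSetMat pvGetMat
      rw [List.set_set]
      congr 1
      · rw [getD_set_ne _ _ _ _ _ (by omega), getD_set_self _ _ _ _ hlt]

-- B's inner fold builds cRow
lemma rowB_spec (iN : Nat) :
    ∀ (t : Nat),
      (List.range t).foldl
          (fun (s : List Int × Int) (k : Nat) =>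
            (s.1 ++ [s.2], PySem.Int.floordiv (s.2 * ((iN:Int) + (k:Int) + 1)) ((k:Int) + 1)))
          ([], 1)
        = ((List.range t).map (cVal iN), cVal iN t) := by
  intro t
  induction t with
  | zero => simp [cVal]
  | succ t ih =>
      rw [List.range_succ, List.foldl_append, ih, List.foldl_cons, List.foldl_nil]
      have key_nat : (iN + t).choose t * (iN + t + 1) = (iN + (t+1)).choose (t+1) * (t+1) := by
        have h := Nat.add_one_mul_choose_eq (iN + t) t
        rw [show iN + (t+1) = (iN+t)+1 by omega, Nat.mul_comm]
        exact h
      have key : (cVal iN t) * ((iN:Int) + (t:Int) + 1) = cVal iN (t+1) * ((t:Int)+1) := by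
        unfold cVal
        exact_mod_cast key_nat
      simp only [Prod.mk.injEq]
      constructor
      · simp
      · rw [key, PySem.Int.floordiv_eq_ediv_of_pos (by omega)]
        exact Int.mul_ediv_cancel _ (by omega)

-- the 1-D Pascal scan
lemma pvScan_row (i mm : Nat) :
    ∀ (t j0 : Nat), 1 ≤ j0 → j0 + t = mm + 1 →
      pvScan (fun j p _ => (cRow i (mm+1)).getD j 0 + p) j0 (cVal (i+1) (j0-1))
          (List.replicate t 0)
        = (List.range' j0 t 1).map (cVal (i+1)) := by
  intro t
  induction t with
  | zero => intro j0 _ _; simp [pvScan]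
  | succ t ih =>
      intro j0 hj0 hsum
      have hlt : j0 < mm + 1 := by omega
      have hget : (cRow i (mm+1)).getD j0 0 = cVal i j0 := by
        simp [cRow, List.getD_eq_getElem?_getD, hlt]
      obtain ⟨s, rfl⟩ : ∃ s, j0 = s + 1 := ⟨j0 - 1, by omega⟩
      have hpascal : cVal i (s+1) + cVal (i+1) s = cVal (i+1) (s+1) := by
        unfold cVal
        have : (i+1) + (s+1) = (i + (s+1)) + 1 := by omega
        rw [this, Nat.choose_succ_succ]
        have e1 : i + (s+1) = (i+1) + s := by omega
        push_cast [e1]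
        ring
      simp only [List.replicate_succ, pvScan, hget, Nat.add_sub_cancel]
      rw [hpascal]
      rw [List.range'_succ, List.map_cons]
      refine congrArg _ ?_
      have := ih (s+2) (by omega) (by omega)
      simpa [Nat.add_sub_cancel] using this

-- the 2-D scan over rows
lemma pvScan_rows (mm : Nat) (G : Nat → List Int → List Int → List Int)
    (hG : ∀ i, G (i+1) (cRow i (mm+1)) (1 :: List.replicate mm 0) = cRow (i+1) (mm+1)) :
    ∀ (t i : Nat),
      pvScan G (i+1) (cRow i (mm+1)) (List.replicate t (1 :: List.replicate mm 0))
        = (List.range' (i+1) t 1).map (fun i' => cRow i' (mm+1)) := by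
  intro t
  induction t with
  | zero => intro i; simp [pvScan]
  | succ t ih =>
      intro i
      simp only [List.replicate_succ, pvScan, hG i, List.range'_succ, List.map_cons]
      exact congrArg _ (ih (i+1))


-- each outer step of A's third loop rewrites only row k+1 (from the fixed row k)
lemma outerA_eq (js : List Int) :
    ∀ (ks : List Nat) (M : List (List Int)), (∀ k ∈ ks, k+1 < M.length) →
      ks.foldl (fun M k => js.foldl (fun M j =>
          pvSetMat M (k+1) j.toNat (pvGetMat M k j.toNat + pvGetMat M (k+1) (j.toNat - 1))) M) M
      = ks.foldl (fun M k => M.set (k+1) (js.foldl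
          (fun r j => r.set j.toNat ((M.getD k []).getD j.toNat 0 + r.getD (j.toNat - 1) 0))
          (M.getD (k+1) []))) M := by
  intro ks
  induction ks with
  | nil => intro M _; rfl
  | cons k ks ih =>
      intro M hk
      simp only [List.foldl_cons]
      have h1 := foldl_inner_row js (k+1) M (by omega) (hk k (by simp))
      simp only [Nat.add_sub_cancel] at h1
      rw [h1]
      exact ih _ (fun k' hk' => by simpa using hk k' (List.mem_cons_of_mem _ hk'))

-- one inner pass of A's third loop turns row i+1 (= [1,0,…,0]) into cRow (i+1)
lemma G_step (mm i : Nat) :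
    (PySem.List.pyRange 1 ((mm:Int)+1) 1).foldl
        (fun r j => r.set j.toNat ((cRow i (mm+1)).getD j.toNat 0 + r.getD (j.toNat - 1) 0))
        (1 :: List.replicate mm 0)
      = cRow (i+1) (mm+1) := by
  have e : ((mm:Int) + 1 - 1).toNat = mm := by omega
  rw [PySem.List.pyRange_one, e, List.foldl_map]
  have ec : ∀ k : Nat, ((1:Int)+(k:Nat)).toNat = k + 1 := fun k => by omega
  simp only [ec, Nat.add_sub_cancel]
  have h := foldl_set_scan (0:Int) (fun jj p _ => (cRow i (mm+1)).getD jj 0 + p)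
      (List.replicate mm (0:Int)) [1] (by simp)
  rw [List.range'_eq_map_range, List.foldl_map] at h
  simp only [List.length_singleton, List.length_replicate, List.singleton_append,
    List.getD_cons_zero, Nat.sub_self,
    show ∀ n:Nat, 1+n = n+1 from fun n => Nat.add_comm 1 n, Nat.add_sub_cancel] at h
  rw [h]
  have hp := pvScan_row i mm mm 1 (by omega) (by omega)
  rw [show cVal (i+1) (1-1) = (1:Int) by simp [cVal]] at hp
  rw [hp]
  have hr : List.range (mm+1) = 0 :: List.range' 1 mm 1 := by
    rw [List.range_eq_range', List.range'_succ]
  simp [cRow, hr, cVal]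

-- A on nonnegative inputs
lemma A_nonneg (mm nn : Nat) :
    track_counter (mm : Int) (nn : Int)
      = (List.range (nn+1)).map (fun i => cRow i (mm+1)) := by
  simp only [track_counter]
  have e1 : ((nn:Int)+1-0).toNat = nn+1 := by omega
  have e2 : ((mm:Int)+1-0).toNat = mm+1 := by omega
  have e3 : ((nn:Int)+1-1).toNat = nn := by omega
  have e4 : ((mm:Int)+1).toNat = mm+1 := by omega
  have ec : ∀ k : Nat, ((1:Int)+(k:Nat)).toNat = k + 1 := fun k => by omega
  rw [PySem.List.pyRange_one 0 ((nn:Int)+1), PySem.List.pyRange_one 0 ((mm:Int)+1),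
      PySem.List.pyRange_one 1 ((nn:Int)+1), e1, e2, e3, e4]
  simp only [zero_add, List.map_map]
  rw [show (List.range (nn+1)).map ((fun (_ : Int) => List.replicate (mm+1) (0:Int)) ∘ (fun (k : Nat) => (k:Int)))
        = List.replicate (nn+1) (List.replicate (mm+1) (0:Int)) by
      simp [Function.comp_def, List.map_const']]
  simp only [List.foldl_map, Int.toNat_natCast, ec, Nat.add_sub_cancel]
  -- loop 1: seed column 0
  have h1' : (List.range (nn+1)).foldl (fun K k => pvSetMat K k 0 1)
        (List.replicate (nn+1) (List.replicate (mm+1) (0:Int)))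
      = List.replicate (nn+1) (1 :: List.replicate mm (0:Int)) := by
    have h1 := foldl_set_indep ([] : List Int) (fun r => r.set 0 1)
        (List.replicate (nn+1) (List.replicate (mm+1) (0:Int))) []
    simp only [List.nil_append, List.length_nil, List.length_replicate] at h1
    rw [← List.range_eq_range', List.map_replicate,
        show (List.replicate (mm+1) (0:Int)).set 0 1 = 1 :: List.replicate mm 0 by
          rw [List.replicate_succ, List.set_cons_zero]] at h1
    exact h1
  rw [h1']
  -- loop 2: seed row 0
  have h2' : (List.range (mm+1)).foldl (fun K k => pvSetMat K 0 k 1)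
        (List.replicate (nn+1) (1 :: List.replicate mm (0:Int)))
      = List.replicate (mm+1) (1:Int) :: List.replicate nn (1 :: List.replicate mm (0:Int)) := by
    rw [List.replicate_succ]
    simp only [pvSetMat]
    rw [foldl_set_head ([] : List Int) (fun (k : Nat) (r : List Int) => r.set k 1)]
    have h2 := foldl_set_indep (0 : Int) (fun _ => (1:Int)) (1 :: List.replicate mm (0:Int)) []
    simp only [List.nil_append, List.length_nil, List.length_cons, List.length_replicate] at h2
    rw [← List.range_eq_range'] at h2
    rw [h2, show (1 :: List.replicate mm (0:Int)).map (fun _ => (1:Int))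
          = List.replicate (mm+1) (1:Int) by simp [List.replicate_succ]]
  rw [h2']
  -- loop 3
  rw [outerA_eq (PySem.List.pyRange 1 ((mm:Int)+1) 1) (List.range nn)
      (List.replicate (mm+1) 1 :: List.replicate nn (1 :: List.replicate mm 0))
      (by intro k hk; simp only [List.mem_range] at hk; simp; omega)]
  have h3 := foldl_set_scan ([] : List Int)
      (fun i prev cur => (PySem.List.pyRange 1 ((mm:Int)+1) 1).foldl
        (fun r j => r.set j.toNat (prev.getD j.toNat 0 + r.getD (j.toNat - 1) 0)) cur)
      (List.replicate nn (1 :: List.replicate mm (0:Int))) [List.replicate (mm+1) (1:Int)]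
      (by simp)
  rw [List.range'_eq_map_range, List.foldl_map] at h3
  simp only [List.length_singleton, List.length_replicate, List.singleton_append,
    List.getD_cons_zero, Nat.sub_self,
    show ∀ n:Nat, 1+n = n+1 from fun n => Nat.add_comm 1 n, Nat.add_sub_cancel] at h3
  rw [h3]
  have hrow0 : cRow 0 (mm+1) = List.replicate (mm+1) (1:Int) := by
    rw [cRow, show (cVal 0) = (fun _ : Nat => (1:Int)) from funext fun j => by simp [cVal]]
    simp
  have h4 := pvScan_rows mm
      (fun i prev cur => (PySem.List.pyRange 1 ((mm:Int)+1) 1).foldl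
        (fun r j => r.set j.toNat (prev.getD j.toNat 0 + r.getD (j.toNat - 1) 0)) cur)
      (fun i => G_step mm i) nn 0
  rw [hrow0] at h4
  rw [h4]
  have hr : List.range (nn+1) = 0 :: List.range' 1 nn 1 := by
    rw [List.range_eq_range', List.range'_succ]
  simp [hr, hrow0]

-- B on nonnegative inputs
lemma B_nonneg (mm nn : Nat) :
    track_counter_alt (mm : Int) (nn : Int)
      = (List.range (nn+1)).map (fun i => cRow i (mm+1)) := by
  unfold track_counter_alt
  have e1 : ((nn:Int) + 1 - 0).toNat = nn + 1 := by omega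
  have e2 : ((mm:Int) + 1 - 0).toNat = mm + 1 := by omega
  rw [PySem.List.pyRange_one, PySem.List.pyRange_one, e1, e2]
  simp only [zero_add]
  rw [PySem.List.foldl_append_singleton_eq_map]
  rw [List.nil_append, List.map_map]
  refine List.map_congr_left (fun k _ => ?_)
  show (((List.range (mm+1)).map _).foldl _ ([], 1)).1 = _
  rw [List.foldl_map]
  rw [rowB_spec k (mm+1)]
  rfl

-- both empty when both arguments are negative
lemma both_neg (x y : Int) (hx : x < 0) (hy : y < 0) :
    track_counter x y = track_counter_alt x y := by
  have h1 : PySem.List.pyRange 0 (y+1) 1 = [] := PySem.List.pyRange_one_eq_nil (by omega)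
  have h2 : PySem.List.pyRange 0 (x+1) 1 = [] := PySem.List.pyRange_one_eq_nil (by omega)
  have h3 : PySem.List.pyRange 1 (y+1) 1 = [] := PySem.List.pyRange_one_eq_nil (by omega)
  simp [track_counter, track_counter_alt, h1, h2, h3]


-- ===== VERDICT (by name: the statement is the Claim_ definition above) =====
theorem track_counter_spec : Claim_equal_track_counter := by
  intro x y _ hpre
  unfold Spec_track_counter
  rcases hpre with ⟨hx, hy⟩ | ⟨hx, hy⟩
  · obtain ⟨mm, rfl⟩ : ∃ k : Nat, x = (k : Int) := ⟨x.toNat, by omega⟩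
    obtain ⟨nn, rfl⟩ : ∃ k : Nat, y = (k : Int) := ⟨y.toNat, by omega⟩
    rw [A_nonneg, B_nonneg]
  · exact both_neg x y hx hy
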